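/- PORTED by tools/port_fixed.py from Prog/Jsmn/D/StrQuote.lean to THE FIXED IMAGE fixed/jsmn_d.bin (same bytes at the same addresses; binFD). Do not edit: edit the original and port again. -/
/-
  jsmn_d.bin, `jsmn_parse_string`: the closing quote (10014EH) — counting mode returns 0; otherwise `jsmn_alloc_token` (NULL → JSMN_ERROR_NOMEM,
  `pos = start`) and `jsmn_fill_token(token, JSMN_STRING, start + 1, pos)`. The two callees are used through their contracts.
-/
import Prog.Jsmn.Fixed.Specs
import Prog.Jsmn.Fixed.CodeFD
import Prog.Jsmn.Fixed.D.StrTok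
namespace X86
namespace J6
namespace FD
namespace Str
open X86.User (CodeAt RegsKept Span FlagsOK Layout toNat_add_ofNat toNat_ofNat_lt' add_ofNat_add)
open Jsmn JsmnFDBytes

set_option maxRecDepth 100000
set_option maxHeartbeats 4000000
set_option linter.unusedSimpArgs false
set_option linter.unusedVariables false

variable {c : SCtx} {n : User.Layout} {v0 v : User.State}

/-- 10014EH in counting mode (`tokens == NULL`): return 0, `pos` stays at the quote. -/
theorem quote_count (he : Entry c n v0) {q : Nat} (ha : At c n v0 v 0x10014e q) (hn : c.toks = none) :
    Reach n v (fun v' => AtRet c n v0 v' 0 { c.p with pos := q } none) := by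
  obtain ⟨hp, hr8⟩ := he
  obtain ⟨hrip, hf⟩ := ha
  v3_open hp hf
  have hp_env_toksR_hi := hp.toksW.hi
  have hp_env_toksR_img := hp.toksW.img
  have hp_env_toksR_stk := hp.toksW.stk
  j6f_bin
  rw [hn] at hf_core_toksArg
  have htb : c.tb = 0 := hf_core_toksArg
  v3_walk hf_core_code hp.call.fetch [htb] until [0x10019d]
  · refine Reach.done ⟨by simp, ⟨by (v3_regnorm; exact hf_core_rsp), by v3_kept, by v3_frame hf_core_svbp, by v3_frame hf_core_svbx, by v3_frame hf_core_retA,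
        by (unfold dataWins SCtx.tlen at *; v3_same), by v3_frame hf_core_code, by v3_frame hf.core.parser, htb⟩, by v3_regnorm; rfl⟩

/-- 10014EH with a token array: `jsmn_alloc_token`; NULL → JSMN_ERROR_NOMEM with `pos = start`; otherwise `jsmn_fill_token` and return 0. -/
theorem quote_tok (halloc : AllocSpec binFD n) (hfill : FillSpec binFD n) (he : Entry c n v0) {q : Nat} {ts : Tokens} (ha : At c n v0 v 0x10014e q)
    (hs : c.toks = some ts) :
    Reach n v (fun v' =>
      match allocToken Config.default { c.p with pos := q } ts c.numTokens with
      | none => AtRet c n v0 v' JSMN_ERROR_NOMEM c.p (some ts)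
      | some (i, p', ts') =>
        AtRet c n v0 v' 0 p' (some (ts'.set i (fillToken (ts'.getD i default) JSMN_STRING (i32 (i32 c.p.pos + 1)) (i32 q))))) := by
  obtain ⟨hp, hr8⟩ := he
  obtain ⟨hrip, hf⟩ := ha
  v3_open hp hf
  have hp_env_toksR_hi := hp.toksW.hi
  have hp_env_toksR_img := hp.toksW.img
  have hp_env_toksR_stk := hp.toksW.stk
  j6f_bin
  str_some_f
  have hp_env_toksR_lo := (hp.env.toksR.resolve_left htb0).lo
  have himg : CodeAt v.mem 0x100000 binFD.image := by v3_frame hp.call.img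
  have hq32 : q < 2 ^ 32 := hf_core_parser_pos ▸ User.Mem.readLE4_lt _ _
  have hpos : c.p.pos < 2 ^ 32 := hp_parser_pos ▸ User.Mem.readLE4_lt _ _
  v3_walk hf_core_code hp.call.fetch [] until [0x10019d]
  -- right after `call jsmn_alloc_token`
  refine Reach.trans (halloc _ 0x100165 c.pa c.tb c.numTokens { c.p with pos := q } ts ?pre) ?_
  case pre =>
    refine ⟨by show CallPre n 0x100000 binFD.image 0x100040 0 0x100165 _; v3_callpre himg hp.call, by simp, by simp, by simp, hp_nlt,
      by v3_frame hf.core.parser, by show TokensAt Config.default _ _ _; v3_frame htoks, htslen,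
      ⟨hp_env_parserR_lo, hp_env_parserR_hi, ?_, ?_⟩, ⟨hp_env_toksR_lo, ?_, ?_, ?_⟩, ?_⟩
    all_goals j6f_bin
    all_goals first | v3_omega | (v3_regnorm; v3_omega)
  intro v1 hpost
  obtain ⟨hpost1, hres⟩ := hpost
  v3_open hpost1
  have hk := hpost1.kept
  v3_viewnorm [X86.J6.dataWins, X86.J6.binFD_cfg, X86.J6.tokSize_default, X86.J6.links_default] at hpost1_rsp hpost1_same hres
  have hcore1 : ∀ pp tk, ParserAt v1.mem c.pa pp → ToksArg Config.default v1.mem c.tb c.numTokens tk → Core c n v0 v1 pp tk := fun pp tk h1 h2 =>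
    ⟨hpost1_rsp, RegsKept.trans (by v3_kept) (hk.mono (by v3_regs_sub)), by v3_frame hf_core_svbp, by v3_frame hf_core_svbx, by v3_frame hf_core_retA,
      by (unfold dataWins SCtx.tlen; simp only [hs, toksBytes, tokSize_default]; v3_same), by v3_frame hcodeW, h1, h2⟩
  have hrbx : v1.reg .rbx = c.pa := by rw [hk.get .rbx rfl]; v3_regnorm; exact hf_rbx
  have hrbp : v1.reg .rbp = UInt64.ofNat c.p.pos := by rw [hk.get .rbp rfl]; v3_regnorm; exact hf_rbp
  cases hall : allocToken Config.default { c.p with pos := q } ts c.numTokens with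
  | none =>
    rw [hall] at hres
    obtain ⟨hrax, hmem⟩ := hres
    exact alloc_null ⟨hp, hr8⟩ hpost1_rip hs (hcore1 _ _ (by rw [hmem]; v3_frame hf.core.parser) ⟨htb0, htslen, by rw [hmem]; v3_frame htoks⟩) hrax hrbx hrbp
  | some r =>
    obtain ⟨i, p', ts'⟩ := r
    rw [hall] at hres
    obtain ⟨hrax, hpar, htk⟩ := hres
    simp only [allocToken] at hall
    split at hall
    · exact absurd hall (by simp)
    · rename_i hlt
      simp only [Option.some.injEq, Prod.mk.injEq] at hall
      obtain ⟨hi, hp', hts'⟩ := hall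
      have hlen' : ts'.length = c.numTokens := by rw [← hts', List.length_set]; exact htslen
      exact alloc_some hfill ⟨hp, hr8⟩ hpost1_rip hs (hcore1 _ _ hpar ⟨htb0, hlen', htk⟩) (by rw [← hp']) (by omega) hrax hrbx hrbp

end Str
end FD
end J6
end X86
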